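-- pv_equiv track=rewrite | github.com/fall-out-bug/AI_Advent_Challenge | archive/legacy/day_05/utils/text_utils.py | normalize_for_trigger
-- ===== SOURCE A (Python) =====
-- import unicodedata
--
-- def normalize_for_trigger(text: str) -> str:
--     """
--     Normalize unicode and punctuation to improve trigger matching.
--
--     Args:
--         text: Input text to normalize
--
--     Returns:
--         Normalized text with collapsed spaces
--     """
--     if not text:
--         return ""
--
--     # Unicode normalize and lower
--     normalized = unicodedata.normalize('NFKC', text).lower()
--
--     # Replace common separators with space
--     separators = [
--         "\u2013", "\u2014", "-", "_", "|", ",", ".", "!", "?",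
--         "\u00A0", "\u2019", "\u2018", "\u201c", "\u201d",
--         "\"", "'", ":", ";", "(", ")", "[", "]", "{", "}"
--     ]
--
--     for separator in separators:
--         normalized = normalized.replace(separator, " ")
--
--     # Collapse spaces
--     return " ".join(normalized.split())
-- ===== SOURCE B (Python) =====
-- import unicodedata
--
-- _SEPS = frozenset(
--     "\u2013\u2014-_|,.!?\u00A0\u2019\u2018\u201c\u201d\"':;()[]{}"
-- )
--
-- def normalize_for_trigger(text: str) -> str:
--     """One pass over the NFKC-lowered text, mapping separator chars to spaces."""
--     if not text:
--         return ""
--     normalized = unicodedata.normalize("NFKC", text).lower()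
--     mapped = "".join(" " if c in _SEPS else c for c in normalized)
--     return " ".join(mapped.split())
-- ===== Notes on version B (the rewrite author's own statement) =====
-- stated objective: simpler
-- what changed: Replaces A's 24 sequential full-string .replace passes by a single character-level pass that maps each separator character (looked up in a precomputed set) to a space before the final split/join collapse.
import Mathlib
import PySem

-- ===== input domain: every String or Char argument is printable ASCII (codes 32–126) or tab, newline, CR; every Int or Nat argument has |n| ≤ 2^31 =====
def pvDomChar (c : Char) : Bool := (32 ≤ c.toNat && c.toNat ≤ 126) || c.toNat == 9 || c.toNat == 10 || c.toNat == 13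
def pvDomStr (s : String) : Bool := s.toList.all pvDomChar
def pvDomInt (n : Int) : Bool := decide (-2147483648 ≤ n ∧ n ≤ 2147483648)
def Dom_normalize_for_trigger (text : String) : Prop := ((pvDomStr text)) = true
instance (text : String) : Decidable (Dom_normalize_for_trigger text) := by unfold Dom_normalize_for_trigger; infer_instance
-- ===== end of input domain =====

-- B replaces A's 24 sequential full-string .replace passes by one character-level pass
-- with a set-membership test (objective: simpler). Return value only; no mutation.
-- In both ports, unicodedata.normalize('NFKC', ·) is ported as the identity function:
-- this is exact on the stated domain (printable ASCII plus tab/newline/CR), where NFKC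
-- normalization changes nothing.

-- ===== PORT A =====
def pvSepsA : List String :=
  ["\u2013", "\u2014", "-", "_", "|", ",", ".", "!", "?",
   "\u00A0", "\u2019", "\u2018", "\u201c", "\u201d",
   "\"", "'", ":", ";", "(", ")", "[", "]", "{", "}"]

def normalize_for_trigger (text : String) : String :=
  if text == "" then ""
  else
    -- normalized = unicodedata.normalize('NFKC', text).lower()  (NFKC = identity on Dom, see header)
    let normalized := PySem.Str.lower text
    -- for separator in separators: normalized = normalized.replace(separator, " ")
    let normalized := pvSepsA.foldl (fun s sep => PySem.Str.replace s sep " ") normalized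
    -- " ".join(normalized.split())
    PySem.Str.join " " (PySem.Str.split₀ normalized)

-- ===== PORT B =====
def pvSepSetB : PySem.Set Char :=
  PySem.Set.ofList
    ['\u2013', '\u2014', '-', '_', '|', ',', '.', '!', '?',
     '\u00A0', '\u2019', '\u2018', '\u201c', '\u201d',
     '"', '\'', ':', ';', '(', ')', '[', ']', '{', '}']

def normalize_for_trigger_alt (text : String) : String :=
  if text == "" then ""
  else
    let normalized := PySem.Str.lower text  -- NFKC = identity on Dom, see header
    -- ''.join(' ' if c in _SEPS else c for c in normalized)  (exact: a per-character map)
    let mapped := String.ofList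
      (normalized.toList.map (fun c => if PySem.Set.contains pvSepSetB c then ' ' else c))
    PySem.Str.join " " (PySem.Str.split₀ mapped)

-- ===== PRECONDITION & SPEC =====
def Spec_normalize_for_trigger (text : String) (out : String) : Prop := out = normalize_for_trigger_alt text
instance (text : String) (out : String) : Decidable (Spec_normalize_for_trigger text out) := by unfold Spec_normalize_for_trigger; infer_instance

-- ===== CLAIM (what is proved, stated in full; the proofs are below) =====
def Claim_equal_normalize_for_trigger : Prop := ∀ (text : String), Dom_normalize_for_trigger text → Spec_normalize_for_trigger text (normalize_for_trigger text)

-- ===== LEMMAS AND PROOFS =====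

-- replace with a single-char pattern is a per-character map
theorem pv_go_single (a : Char) : ∀ (fuel : Nat) (l acc : List Char), l.length ≤ fuel →
    PySem.Chars.replace.go [a] [' '] fuel l acc
      = acc.reverse ++ l.map (fun c => if c == a then ' ' else c) := by
  intro fuel
  induction fuel with
  | zero =>
    intro l acc h
    have : l = [] := List.eq_nil_of_length_eq_zero (Nat.le_zero.mp h)
    subst this
    simp [PySem.Chars.replace.go]
  | succ n ih =>
    intro l acc h
    cases l with
    | nil => simp [PySem.Chars.replace.go]
    | cons c t =>
      simp only [PySem.Chars.replace.go, List.isPrefixOf, Bool.and_true]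
      by_cases hc : a = c
      · subst hc
        simp only [beq_self_eq_true, if_pos]
        rw [show List.drop [a].length (a :: t) = t from rfl,
          show ([' '].reverse ++ acc : List Char) = ' ' :: acc from rfl]
        rw [ih t (' ' :: acc) (by simpa using Nat.le_of_succ_le_succ h)]
        simp
      · have hbeq : (a == c) = false := beq_eq_false_iff_ne.mpr hc
        have hbeq' : (c == a) = false := beq_eq_false_iff_ne.mpr (Ne.symm hc)
        simp only [hbeq, Bool.false_eq_true, if_false]
        rw [ih t (c :: acc) (by simpa using Nat.le_of_succ_le_succ h)]
        simp only [List.map_cons, hbeq', Bool.false_eq_true, if_false,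
          List.reverse_cons, List.append_assoc, List.cons_append, List.nil_append]

theorem pv_replace_single (l : List Char) (a : Char) :
    PySem.Chars.replace l [a] [' '] = l.map (fun c => if c == a then ' ' else c) := by
  have := pv_go_single a l.length l [] le_rfl
  simpa [PySem.Chars.replace] using this

-- folding per-character replacement maps = one map with membership
theorem pv_fold_map (ss : List Char) : ∀ (l : List Char),
    List.foldl (fun t a => t.map (fun c => if c == a then ' ' else c)) l ss
      = l.map (fun c => if decide (c ∈ ss) = true then ' ' else c) := by
  induction ss with
  | nil => intro l; simp
  | cons a ss ih =>
    intro l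
    simp only [List.foldl_cons]
    rw [ih, List.map_map]
    apply List.map_congr_left
    intro c _
    by_cases hc : c = a
    · subst hc
      by_cases hmem : ' ' ∈ ss <;> simp [hmem]
    · have : (c == a) = false := beq_eq_false_iff_ne.mpr hc
      simp [hc]

-- A's foldl of Str.replace, moved to the char level
theorem pv_foldA_toList : ∀ (seps : List String) (s : String),
    (List.foldl (fun s sep => PySem.Str.replace s sep " ") s seps).toList
      = List.foldl (fun t (sep : String) => PySem.Chars.replace t sep.toList [' ']) s.toList seps := by
  intro seps
  induction seps with
  | nil => intro s; rfl
  | cons a seps ih =>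
    intro s
    simp only [List.foldl_cons]
    rw [ih]
    congr 1
    rw [PySem.Str.toList_replace]
    congr 1

def pvSepCharsA : List Char :=
  ['\u2013', '\u2014', '-', '_', '|', ',', '.', '!', '?',
   '\u00A0', '\u2019', '\u2018', '\u201c', '\u201d',
   '"', '\'', ':', ';', '(', ')', '[', ']', '{', '}']

theorem pv_sepsA_chars : pvSepsA.map String.toList = pvSepCharsA.map (fun c => [c]) := by decide

theorem pv_mapped_eq (t : List Char) :
    List.foldl (fun u (sep : String) => PySem.Chars.replace u sep.toList [' ']) t pvSepsA
      = t.map (fun c => if PySem.Set.contains pvSepSetB c then ' ' else c) := by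
  have h1 : List.foldl (fun u (sep : String) => PySem.Chars.replace u sep.toList [' ']) t pvSepsA
      = List.foldl (fun u (cl : List Char) => PySem.Chars.replace u cl [' ']) t
          (pvSepsA.map String.toList) := by
    rw [List.foldl_map]
  rw [h1, pv_sepsA_chars, List.foldl_map]
  have h2 : List.foldl (fun u (c : Char) => PySem.Chars.replace u [c] [' ']) t pvSepCharsA
      = List.foldl (fun u (a : Char) => u.map (fun c => if c == a then ' ' else c)) t pvSepCharsA := by
    apply PySem.List.foldl_congr_mem
    intro u a _
    exact pv_replace_single u a
  rw [h2, pv_fold_map]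
  apply List.map_congr_left
  intro c _
  by_cases hmem : c ∈ pvSepCharsA
  · have hb : c ∈ pvSepSetB := (PySem.Set.mem_ofList pvSepCharsA c).mpr hmem
    simp [hmem, hb]
  · have hb : c ∉ pvSepSetB := fun hx => hmem ((PySem.Set.mem_ofList pvSepCharsA c).mp hx)
    simp [hmem, hb]

-- ===== VERDICT (by name: the statement is the Claim_ definition above) =====
theorem normalize_for_trigger_spec : Claim_equal_normalize_for_trigger := by
  intro text _
  unfold Spec_normalize_for_trigger normalize_for_trigger normalize_for_trigger_alt
  by_cases h : text == ""
  · simp [h]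
  · simp only [h, Bool.false_eq_true, if_false]
    have hmap : pvSepsA.foldl (fun s sep => PySem.Str.replace s sep " ") (PySem.Str.lower text)
        = String.ofList ((PySem.Str.lower text).toList.map
            (fun c => if PySem.Set.contains pvSepSetB c then ' ' else c)) := by
      apply String.toList_inj.mp
      rw [pv_foldA_toList, pv_mapped_eq, String.toList_ofList]
    rw [hmap]
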